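-- pv_equiv track=rewrite | github.com/Bae-hong-seob/- | baekjoon_Algorithm 문제모음/브루트포스 문제/1. 금민수 개수 474747(1527번).py | expand_digit
-- ===== SOURCE A (Python) =====
-- def expand_digit(num,depth,_47list):
--
--     if depth == 10:
--         return
--     add_4 = (num*10) +4
--     add_7 = (num*10) +7
--     _47list.append(add_4)
--     _47list.append(add_7)
--
--     expand_digit(add_4, depth+1, _47list)
--     expand_digit(add_7, depth+1, _47list)
--
--     return _47list
-- ===== SOURCE B (Python) =====
-- def expand_digit(num, depth, _47list):
--     if depth == 10:
--         return None
--     stack = [(num, depth)]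
--     while stack:
--         n, d = stack.pop()
--         if d == 10:
--             continue
--         add_4 = n * 10 + 4
--         add_7 = n * 10 + 7
--         _47list.append(add_4)
--         _47list.append(add_7)
--         stack.append((add_7, d + 1))
--         stack.append((add_4, d + 1))
--     return _47list
-- ===== Notes on version B (the rewrite author's own statement) =====
-- stated objective: alternative
-- what changed: Replaces A's binary recursion with an explicit LIFO stack loop (pushing the 7-child below the 4-child) that reproduces the same depth-first, siblings-first append order without recursion.
import Mathlib
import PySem

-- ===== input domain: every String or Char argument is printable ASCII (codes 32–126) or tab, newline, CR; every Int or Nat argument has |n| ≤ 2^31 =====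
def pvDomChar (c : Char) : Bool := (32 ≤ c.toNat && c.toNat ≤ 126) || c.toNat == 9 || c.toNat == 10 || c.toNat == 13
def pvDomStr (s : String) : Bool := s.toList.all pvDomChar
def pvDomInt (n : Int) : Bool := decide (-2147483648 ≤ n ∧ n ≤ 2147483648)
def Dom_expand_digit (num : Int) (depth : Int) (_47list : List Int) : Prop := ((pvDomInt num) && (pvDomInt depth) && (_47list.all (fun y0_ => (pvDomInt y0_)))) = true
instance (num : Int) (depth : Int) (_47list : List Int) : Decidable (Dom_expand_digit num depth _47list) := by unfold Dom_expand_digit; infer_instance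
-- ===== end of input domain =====

-- B replaces A's binary recursion by an explicit LIFO stack loop with the same append order;
-- both A and B mutate the argument list in place in Python — the equivalence proved here is about the return value only.


-- ===== PORT A =====
-- A's recursion: at each call append num*10+4 and num*10+7, then recurse into the 4-child
-- and then the 7-child; depth == 10 returns None.  The fuel (11-depth).toNat is exact for
-- every depth ≤ 10 (inside Pre_); a recursive call returning none leaves the list unchanged,
-- which models Python's in-place mutation (the callee appended nothing before returning None).
def expand_digit_go : Nat → Int → Int → List Int → Option (List Int)
  | 0, _, _, _ => none
  | fuel + 1, num, depth, l =>
    if depth = 10 then none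
    else
      let add_4 := num * 10 + 4
      let add_7 := num * 10 + 7
      let l1 := l ++ [add_4, add_7]
      let l2 := match expand_digit_go fuel add_4 (depth + 1) l1 with
                | some x => x
                | none => l1
      let l3 := match expand_digit_go fuel add_7 (depth + 1) l2 with
                | some x => x
                | none => l2
      some l3

def expand_digit (num : Int) (depth : Int) (_47list : List Int) : Option (List Int) :=
  expand_digit_go (11 - depth).toNat num depth _47list

-- ===== PORT B =====
-- B's loop: pop (n, d); skip if d == 10; else append both children to the output and push
-- (7-child, d+1) then (4-child, d+1) so the 4-branch is processed next.  Fuel 2^((11-depth).toNat)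
-- bounds the number of loop iterations (2^(11-depth) - 1 pops inside Pre_).
def expand_digit_alt_go : Nat → List (Int × Int) → List Int → List Int
  | 0, _, acc => acc
  | fuel + 1, stack, acc =>
    match stack with
    | [] => acc
    | (n, d) :: rest =>
      if d = 10 then expand_digit_alt_go fuel rest acc
      else
        let add_4 := n * 10 + 4
        let add_7 := n * 10 + 7
        expand_digit_alt_go fuel ((add_4, d + 1) :: (add_7, d + 1) :: rest) (acc ++ [add_4, add_7])

def expand_digit_alt (num : Int) (depth : Int) (_47list : List Int) : Option (List Int) :=
  if depth = 10 then none
  else some (expand_digit_alt_go (2 ^ (11 - depth).toNat) [(num, depth)] _47list)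

-- ===== PRECONDITION & SPEC =====
-- Pre_ restricts to the natural domain of the recursion counter, 0 ≤ depth ≤ 10 (the caller
-- starts it at 0).  For depth > 10 A never reaches the base case and raises RecursionError;
-- for depth < 0 A does return, but the result (2^(11-depth) - 2 numbers) is an accident of
-- calling the helper outside its intent and is infeasibly large already for moderately
-- negative depth, so those inputs are excluded too (B agrees with A there as well).
def Pre_expand_digit (num : Int) (depth : Int) (_47list : List Int) : Prop :=
  0 ≤ depth ∧ depth ≤ 10

instance (num : Int) (depth : Int) (_47list : List Int) : Decidable (Pre_expand_digit num depth _47list) := by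
  unfold Pre_expand_digit; infer_instance

def pvWitness_expand_digit : Int × Int × List Int := (0, 9, [])

def Spec_expand_digit (num : Int) (depth : Int) (_47list : List Int) (out : Option (List Int)) : Prop := out = expand_digit_alt num depth _47list
instance (num : Int) (depth : Int) (_47list : List Int) (out : Option (List Int)) : Decidable (Spec_expand_digit num depth _47list out) := by unfold Spec_expand_digit; infer_instance

-- ===== CLAIM (what is proved, stated in full; the proofs are below) =====
def Claim_equal_expand_digit : Prop := ∀ (num : Int) (depth : Int) (_47list : List Int), Dom_expand_digit num depth _47list → Pre_expand_digit num depth _47list → Spec_expand_digit num depth _47list (expand_digit num depth _47list)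

-- ===== LEMMAS AND PROOFS =====

-- the pure list of numbers generated from seed n with k remaining levels
def gen47 : Nat → Int → List Int
  | 0, _ => []
  | k + 1, n => (n * 10 + 4) :: (n * 10 + 7) :: (gen47 k (n * 10 + 4) ++ gen47 k (n * 10 + 7))

-- one-step unfolding lemmas for the fueled ports
theorem expand_digit_go_succ (fuel : Nat) (num depth : Int) (l : List Int) :
    expand_digit_go (fuel + 1) num depth l =
      if depth = 10 then none
      else
        let add_4 := num * 10 + 4
        let add_7 := num * 10 + 7
        let l1 := l ++ [add_4, add_7]
        let l2 := match expand_digit_go fuel add_4 (depth + 1) l1 with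
                  | some x => x
                  | none => l1
        let l3 := match expand_digit_go fuel add_7 (depth + 1) l2 with
                  | some x => x
                  | none => l2
        some l3 := rfl

theorem expand_digit_alt_go_succ (fuel : Nat) (stack : List (Int × Int)) (acc : List Int) :
    expand_digit_alt_go (fuel + 1) stack acc =
      match stack with
      | [] => acc
      | (n, d) :: rest =>
        if d = 10 then expand_digit_alt_go fuel rest acc
        else
          let add_4 := n * 10 + 4
          let add_7 := n * 10 + 7
          expand_digit_alt_go fuel ((add_4, d + 1) :: (add_7, d + 1) :: rest) (acc ++ [add_4, add_7]) := rfl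

theorem expand_digit_go_eq (k : Nat) : ∀ (n : Int) (l : List Int),
    expand_digit_go (k + 1) n (10 - (k : Int)) l =
      match k with
      | 0 => none
      | _ + 1 => some (l ++ gen47 k n) := by
  induction k with
  | zero => intro n l; simp [expand_digit_go]
  | succ k ih =>
    intro n l
    have hd : (10 : Int) - ((k + 1 : Nat) : Int) ≠ 10 := by push_cast; omega
    have hstep : (10 : Int) - ((k + 1 : Nat) : Int) + 1 = 10 - (k : Int) := by push_cast; omega
    rw [expand_digit_go_succ, if_neg hd]
    simp only [hstep, ih]
    cases k with
    | zero => simp [gen47]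
    | succ m => simp [gen47, List.append_assoc]

theorem expand_digit_alt_go_eq (k : Nat) : ∀ (n : Int) (rest : List (Int × Int)) (acc : List Int) (f : Nat),
    expand_digit_alt_go (2 ^ (k + 1) - 1 + f) ((n, 10 - (k : Int)) :: rest) acc =
      expand_digit_alt_go f rest (acc ++ gen47 k n) := by
  induction k with
  | zero =>
    intro n rest acc f
    have h1 : 2 ^ (0 + 1) - 1 + f = f + 1 := by omega
    rw [h1, expand_digit_alt_go_succ]
    simp [gen47]
  | succ k ih =>
    intro n rest acc f
    have hd : (10 : Int) - ((k + 1 : Nat) : Int) ≠ 10 := by push_cast; omega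
    have hstep : (10 : Int) - ((k + 1 : Nat) : Int) + 1 = 10 - (k : Int) := by push_cast; omega
    have hfuel : 2 ^ (k + 1 + 1) - 1 + f = (2 ^ (k + 1) - 1 + (2 ^ (k + 1) - 1 + f)) + 1 := by
      have h1 : 1 ≤ 2 ^ (k + 1) := Nat.one_le_two_pow
      have h2 : 2 ^ (k + 1 + 1) = 2 ^ (k + 1) * 2 := pow_succ 2 (k + 1)
      omega
    rw [hfuel, expand_digit_alt_go_succ]
    simp only [if_neg hd, hstep]
    rw [ih, ih]
    simp [gen47, List.append_assoc]

-- empty stack: any fuel returns the accumulator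
theorem expand_digit_alt_go_nil (f : Nat) (acc : List Int) :
    expand_digit_alt_go f [] acc = acc := by
  cases f <;> simp [expand_digit_alt_go]

-- ===== VERDICT (by name: the statement is the Claim_ definition above) =====
theorem expand_digit_spec : Claim_equal_expand_digit := by
  unfold Claim_equal_expand_digit
  intro num depth l _ hpre
  obtain ⟨h0, h10⟩ := hpre
  unfold Spec_expand_digit expand_digit expand_digit_alt
  by_cases hd : depth = 10
  · subst hd
    norm_num [expand_digit_go]
  · rw [if_neg hd]
    set k : Nat := (10 - depth).toNat with hk
    have hdk : depth = 10 - (k : Int) := by omega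
    have hfa : (11 - depth).toNat = k + 1 := by omega
    have hk1 : 1 ≤ k := by omega
    have hfuel : 2 ^ (k + 1) = 2 ^ (k + 1) - 1 + 1 := by
      have := Nat.one_le_two_pow (n := k + 1); omega
    rw [hfa, hdk, expand_digit_go_eq, hfuel, expand_digit_alt_go_eq, expand_digit_alt_go_nil]
    obtain ⟨m, hm⟩ : ∃ m, k = m + 1 := ⟨k - 1, by omega⟩
    rw [hm]
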